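-- pv_equiv track=rewrite | github.com/VieVie31/scene_detection | src/functions.py | int_to_bits_indexes
-- ===== SOURCE A (Python) =====
-- def int_to_bits_indexes(n):
--     """Return the list of bits indexes set to 1.
--
--     :param n: the int to convert
--
--     :type n: int
--
--     :return: a list of the indexes of bites sets to 1
--     :rtype: list
--     """
--     L = []
--     i = 0
--     while n:
--         if n % 2:
--             L.append(i)
--         n //= 2
--         i += 1
--     return L
-- ===== SOURCE B (Python) =====
-- def int_to_bits_indexes(n):
--     s = bin(n)[2:]
--     return [i for i, c in enumerate(reversed(s)) if c == '1']
-- ===== Notes on version B (the rewrite author's own statement) =====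
-- stated objective: idiomatic
-- what changed: B builds the binary string once with bin() and collects positions of '1' in a single positional scan over the reversed string, instead of A's arithmetic %2-test-and-//2 extraction loop with an explicit accumulator and counter.
import Mathlib
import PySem

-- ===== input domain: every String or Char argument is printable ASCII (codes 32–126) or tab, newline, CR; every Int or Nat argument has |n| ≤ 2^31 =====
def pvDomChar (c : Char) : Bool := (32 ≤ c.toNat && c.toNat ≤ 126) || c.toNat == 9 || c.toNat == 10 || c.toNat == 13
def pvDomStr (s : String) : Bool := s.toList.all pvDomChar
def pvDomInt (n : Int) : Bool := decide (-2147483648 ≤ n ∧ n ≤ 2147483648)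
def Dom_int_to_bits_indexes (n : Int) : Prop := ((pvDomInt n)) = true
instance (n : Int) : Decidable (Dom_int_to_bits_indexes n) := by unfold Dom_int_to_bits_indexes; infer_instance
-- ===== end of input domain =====

-- B replaces A's arithmetic %2-and-//2 extraction loop by a scan over the reversed binary string.

-- ===== PORT A =====
-- while n: if n % 2: L.append(i); n //= 2; i += 1   (the '¬ n ≤ 0' guard only makes the
-- loop total in Lean: on n < 0 the Python loop never terminates, excluded by Pre_)
def int_to_bits_indexes.loop (n i : Int) : List Int :=
  if _h : n ≤ 0 then []
  else if PySem.Int.mod n 2 ≠ 0 then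
    i :: int_to_bits_indexes.loop (PySem.Int.floordiv n 2) (i + 1)
  else
    int_to_bits_indexes.loop (PySem.Int.floordiv n 2) (i + 1)
termination_by n.toNat
decreasing_by
  all_goals
    rw [PySem.Int.floordiv_eq_ediv_of_pos (by omega : (0:Int) < 2)]
    omega

def int_to_bits_indexes (n : Int) : List Int := int_to_bits_indexes.loop n 0

-- ===== PORT B =====
-- bin(n)[2:] for n > 0 (most-significant digit first); B uses it only on n ≥ 0,
-- with bin(0)[2:] = "0" handled separately below, as in Source B.
def binDigits (n : Int) : List Char :=
  if h : n ≤ 0 then []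
  else binDigits (PySem.Int.floordiv n 2) ++ [if PySem.Int.mod n 2 = 1 then '1' else '0']
termination_by n.toNat
decreasing_by
  rw [PySem.Int.floordiv_eq_ediv_of_pos (by omega : (0:Int) < 2)]
  omega

-- [i for i, c in enumerate(reversed(s)) if c == '1']
def int_to_bits_indexes_alt (n : Int) : List Int :=
  let s : List Char := if n = 0 then ['0'] else binDigits n
  (PySem.List.enumerate s.reverse 0).filterMap
    (fun p => if p.2 = '1' then some p.1 else none)

-- ===== PRECONDITION & SPEC =====
-- Pre_ excludes n < 0: there A's 'while n: … n //= 2' never terminates (n //= 2 stabilises at -1).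
def Pre_int_to_bits_indexes (n : Int) : Prop := 0 ≤ n
instance (n : Int) : Decidable (Pre_int_to_bits_indexes n) := by
  unfold Pre_int_to_bits_indexes; infer_instance

def pvWitness_int_to_bits_indexes : Int := 5

def Spec_int_to_bits_indexes (n : Int) (out : List Int) : Prop := out = int_to_bits_indexes_alt n
instance (n : Int) (out : List Int) : Decidable (Spec_int_to_bits_indexes n out) := by
  unfold Spec_int_to_bits_indexes; infer_instance

-- ===== CLAIM (what is proved, stated in full; the proofs are below) =====
def Claim_equal_int_to_bits_indexes : Prop :=
  ∀ (n : Int), Dom_int_to_bits_indexes n → Pre_int_to_bits_indexes n →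
    Spec_int_to_bits_indexes n (int_to_bits_indexes n)

-- ===== LEMMAS AND PROOFS =====

-- index-carrying form of B's comprehension
def enumFilter : List Char → Int → List Int
  | [], _ => []
  | c :: t, k => if c = '1' then k :: enumFilter t (k + 1) else enumFilter t (k + 1)

theorem filterMap_enumerate_eq_enumFilter (cs : List Char) (k : Int) :
    (PySem.List.enumerate cs k).filterMap (fun p => if p.2 = '1' then some p.1 else none) =
      enumFilter cs k := by
  induction cs generalizing k with
  | nil => simp [PySem.List.enumerate_nil, enumFilter]
  | cons c t ih =>
    rw [PySem.List.enumerate_cons]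
    simp only [List.filterMap_cons, enumFilter]
    split_ifs with h <;> simp [ih]

theorem loop_eq_enumFilter_rev (n i : Int) :
    int_to_bits_indexes.loop n i = enumFilter (binDigits n).reverse i := by
  by_cases h : n ≤ 0
  · rw [int_to_bits_indexes.loop, binDigits]
    simp [h, enumFilter]
  · have hpos : 0 < n := by omega
    have hm0 : 0 ≤ PySem.Int.mod n 2 := PySem.Int.mod_nonneg n (by omega)
    have hm2 : PySem.Int.mod n 2 < 2 := PySem.Int.mod_lt n (by omega)
    rw [int_to_bits_indexes.loop, binDigits]
    simp only [h, dite_false, List.reverse_append, List.reverse_cons, List.reverse_nil,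
      List.nil_append, List.cons_append]
    have ih := loop_eq_enumFilter_rev (PySem.Int.floordiv n 2) (i + 1)
    by_cases hodd : PySem.Int.mod n 2 = 1
    · rw [if_pos (by rw [hodd]; decide)]
      simp only [hodd, enumFilter, ih, if_true]
    · have hz : PySem.Int.mod n 2 = 0 := by omega
      rw [if_neg (by rw [hz]; decide)]
      simp only [hz, enumFilter, ih]
      rw [if_neg (by decide)]
termination_by n.toNat
decreasing_by
  rw [PySem.Int.floordiv_eq_ediv_of_pos (by omega : (0:Int) < 2)]
  omega

-- ===== VERDICT (by name: the statement is the Claim_ definition above) =====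
theorem int_to_bits_indexes_spec : Claim_equal_int_to_bits_indexes := by
  intro n _ hpre
  unfold Spec_int_to_bits_indexes int_to_bits_indexes int_to_bits_indexes_alt
  by_cases h0 : n = 0
  · subst h0
    rw [int_to_bits_indexes.loop]
    simp [PySem.List.enumerate_cons, PySem.List.enumerate_nil]
  · simp only [h0, if_false]
    rw [loop_eq_enumFilter_rev, filterMap_enumerate_eq_enumFilter]
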